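-- pv_equiv track=rewrite | github.com/xqtr/PythonIRC | mirc/chanel.py | mini_mcilen
-- ===== SOURCE A (Python) =====
-- def mini_mcilen(txt):
--   i = 0
--   res = 0
--   while i<len(txt):
--     if txt[i] == '|':
--       i+=2
--     else:
--       i+=1
--       res+=1
--   return res
-- ===== SOURCE B (Python) =====
-- def mini_mcilen(txt):
--   parts = txt.split('|')
--   res = len(parts[0])
--   run = 0  # length of the current maximal run of '|' separators
--   for p in parts[1:]:
--     run += 1
--     if p:
--       res += len(p) - run % 2
--       run = 0
--   return res
-- ===== Notes on version B (the rewrite author's own statement) =====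
-- stated objective: faster
-- what changed: Instead of scanning character by character with index jumps, B splits the text on the pipe separator and computes the count arithmetically from segment lengths, subtracting one visible char for each maximal odd-length pipe run that is followed by text; the per-character work moves into str.split.
import Mathlib
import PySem

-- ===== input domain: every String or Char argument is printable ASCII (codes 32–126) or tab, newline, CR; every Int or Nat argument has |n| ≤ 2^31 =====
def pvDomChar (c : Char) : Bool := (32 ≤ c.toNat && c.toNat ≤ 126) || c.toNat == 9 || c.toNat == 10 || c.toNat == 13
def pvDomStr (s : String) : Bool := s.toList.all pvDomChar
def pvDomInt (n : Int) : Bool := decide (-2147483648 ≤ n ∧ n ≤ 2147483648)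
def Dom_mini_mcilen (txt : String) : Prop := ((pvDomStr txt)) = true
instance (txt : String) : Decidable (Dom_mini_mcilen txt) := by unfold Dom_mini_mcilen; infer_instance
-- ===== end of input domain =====

-- B replaces A's index-jumping character scan by splitting on '|' and computing the count
-- arithmetically from segment lengths and the parity of each maximal pipe run (measured faster:
-- the per-character work moves into str.split).


-- ===== PORT A =====
-- A's while loop: i jumps by 2 past a '|', by 1 (counting) otherwise.
def miniMcilenLoopA (cs : List Char) (i : Nat) (res : Int) : Int :=
  if h : i < cs.length then
    if cs[i] = '|' then miniMcilenLoopA cs (i + 2) res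
    else miniMcilenLoopA cs (i + 1) (res + 1)
  else res
termination_by cs.length - i

def mini_mcilen (txt : String) : Int := miniMcilenLoopA txt.toList 0 0

-- ===== PORT B =====
-- Source B's for-loop body over parts[1:]: state (res, run); run += 1, and if the part is
-- nonempty add len(p) - run % 2 to res and reset run.
def miniMcilenStepB (s : Int × Nat) (p : List Char) : Int × Nat :=
  let run := s.2 + 1
  if p.isEmpty then (s.1, run)
  else (s.1 + (p.length : Int) - ((run % 2 : Nat) : Int), 0)

-- parts = txt.split('|'); res starts at len(parts[0]); fold the loop body over parts[1:].
-- (split never returns an empty list; the [] branch is unreachable.)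
def mini_mcilen_alt (txt : String) : Int :=
  match PySem.Chars.splitOn txt.toList ['|'] with
  | [] => 0
  | p0 :: rest => (rest.foldl miniMcilenStepB ((p0.length : Int), 0)).1

-- ===== PRECONDITION & SPEC =====
def Spec_mini_mcilen (txt : String) (out : Int) : Prop := out = mini_mcilen_alt txt
instance (txt : String) (out : Int) : Decidable (Spec_mini_mcilen txt out) := by unfold Spec_mini_mcilen; infer_instance

-- ===== CLAIM (what is proved, stated in full; the proofs are below) =====
def Claim_equal_mini_mcilen : Prop := ∀ (txt : String), Dom_mini_mcilen txt → Spec_mini_mcilen txt (mini_mcilen txt)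

-- ===== LEMMAS AND PROOFS =====

-- reference count: the visible-character count of a suffix
def miniG : List Char → Int
  | [] => 0
  | ['|'] => 0
  | '|' :: _ :: rest => miniG rest
  | _ :: rest => 1 + miniG rest

theorem miniG_cons (c : Char) (l : List Char) (hc : c ≠ '|') :
    miniG (c :: l) = 1 + miniG l := by
  rw [miniG.eq_def]; split <;> simp_all

theorem miniMcilenLoopA_eq (cs : List Char) (i : Nat) (res : Int) :
    miniMcilenLoopA cs i res = res + miniG (cs.drop i) := by
  induction i, res using miniMcilenLoopA.induct cs with
  | case1 i res h hpipe ih =>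
    rw [miniMcilenLoopA]
    simp only [h, dif_pos, hpipe, if_pos, ih]
    have hdrop : cs.drop i = '|' :: cs.drop (i + 1) := by
      rw [List.drop_eq_getElem_cons h, hpipe]
    rcases Nat.lt_or_ge (i + 1) cs.length with h2 | h2
    · have hdrop2 : cs.drop (i + 1) = cs[i+1] :: cs.drop (i + 2) := by
        rw [List.drop_eq_getElem_cons h2]
      rw [hdrop, hdrop2, miniG]
    · have : cs.drop (i + 1) = [] := List.drop_eq_nil_of_le h2
      rw [hdrop, this]
      have : cs.drop (i + 2) = [] := List.drop_eq_nil_of_le (by omega)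
      rw [this, miniG, miniG]
  | case2 i res h hpipe ih =>
    rw [miniMcilenLoopA]
    simp only [h, dif_pos, hpipe, ih]
    have hdrop : cs.drop i = cs[i] :: cs.drop (i + 1) := List.drop_eq_getElem_cons h
    rw [hdrop, miniG_cons _ _ hpipe]
    simp
    ring
  | case3 i res h =>
    rw [miniMcilenLoopA]
    simp only [h, dif_neg, not_false_iff]
    rw [List.drop_eq_nil_of_le (by omega), miniG]
    ring

-- clean specification of split on the single character '|'
def pvMapHead (f : List Char → List Char) : List (List Char) → List (List Char)
  | [] => []
  | x :: xs => f x :: xs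

def splitPipe : List Char → List (List Char)
  | [] => [[]]
  | c :: r => if c = '|' then [] :: splitPipe r else pvMapHead (c :: ·) (splitPipe r)

theorem splitOn_go_eq (fuel : Nat) (l cur : List Char) (acc : List (List Char))
    (h : l.length < fuel) :
    PySem.Chars.splitOn.go ['|'] fuel l cur acc
      = acc.reverse ++ pvMapHead (cur.reverse ++ ·) (splitPipe l) := by
  induction fuel generalizing l cur acc with
  | zero => omega
  | succ fuel ih =>
    cases l with
    | nil =>
      rw [PySem.Chars.splitOn.go]
      simp [splitPipe, pvMapHead]
      omega
    | cons c rest =>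
      rw [PySem.Chars.splitOn.go]
      by_cases hc : c = '|'
      · subst hc
        have hpre : List.isPrefixOf ['|'] ('|' :: rest) = true := by
          simp [List.isPrefixOf]
        simp only [hpre, if_pos, List.length_cons, List.drop_succ_cons, List.length_nil,
          List.drop_zero]
        rw [ih rest [] (cur.reverse :: acc) (by simpa using Nat.lt_of_succ_lt_succ h)]
        cases hsp : splitPipe rest with
        | nil => simp [splitPipe, hsp, pvMapHead]
        | cons p ps => simp [splitPipe, hsp, pvMapHead]
      · have hpre : List.isPrefixOf ['|'] (c :: rest) = false := by
          simp [List.isPrefixOf]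
          exact fun hh => (hc hh.symm).elim
        simp only [hpre, Bool.false_eq_true, if_false]
        rw [ih rest (c :: cur) acc (by simpa using Nat.lt_of_succ_lt_succ h)]
        cases hsp : splitPipe rest with
        | nil => simp [splitPipe, hsp, pvMapHead, hc]
        | cons p ps => simp [splitPipe, hsp, pvMapHead, hc]

theorem splitOn_eq_splitPipe (cs : List Char) :
    PySem.Chars.splitOn cs ['|'] = splitPipe cs := by
  rw [PySem.Chars.splitOn, splitOn_go_eq (cs.length + 1) cs [] [] (by omega)]
  cases hsp : splitPipe cs with
  | nil => simp [pvMapHead]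
  | cons p ps => simp [pvMapHead]

-- structure of splitPipe: parts are pipe-free and rejoining with '|' recovers the string
theorem splitPipe_spec (cs : List Char) :
    ∃ p ps, splitPipe cs = p :: ps ∧
      cs = p ++ ps.flatMap (fun q => '|' :: q) ∧
      (∀ q ∈ p :: ps, '|' ∉ q) := by
  induction cs with
  | nil => exact ⟨[], [], rfl, rfl, by simp⟩
  | cons c rest ih =>
    obtain ⟨p, ps, hsp, hjoin, hnp⟩ := ih
    by_cases hc : c = '|'
    · subst hc
      refine ⟨[], p :: ps, by simp [splitPipe, hsp], ?_, ?_⟩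
      · simp [hjoin]
      · intro q hq
        simp at hq
        rcases hq with h | h | h
        · simp [h]
        · exact h ▸ hnp p (by simp)
        · exact hnp q (by simp [h])
    · refine ⟨c :: p, ps, ?_, ?_, ?_⟩
      · simp [splitPipe, hsp, pvMapHead, hc]
      · simp [hjoin]
      · intro q hq
        simp at hq
        rcases hq with h | h
        · subst h
          intro hmem
          rcases List.mem_cons.mp hmem with h1 | h1
          · exact hc h1.symm
          · exact hnp p (by simp) h1
        · exact hnp q (by simp [h])

theorem miniG_replicate (k : Nat) : miniG (List.replicate k '|') = 0 := by
  induction k using Nat.twoStepInduction with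
  | zero => rfl
  | one => rfl
  | more k ih _ =>
    rw [List.replicate_succ, List.replicate_succ, miniG]
    exact ih

theorem miniG_nopipe_append (p t : List Char) (hp : '|' ∉ p) :
    miniG (p ++ t) = (p.length : Int) + miniG t := by
  induction p with
  | nil => simp
  | cons c r ih =>
    have hc : c ≠ '|' := fun h => hp (by simp [h])
    rw [List.cons_append, miniG_cons _ _ hc, ih (fun h => hp (by simp [h]))]
    simp only [List.length_cons]; push_cast; ring

theorem miniG_pipes (k : Nat) (p t : List Char) (hp : '|' ∉ p) (hne : p ≠ []) :
    miniG (List.replicate k '|' ++ p ++ t)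
      = (p.length : Int) - ((k % 2 : Nat) : Int) + miniG t := by
  induction k using Nat.twoStepInduction generalizing t with
  | zero =>
    simp only [List.replicate_zero, List.nil_append, Nat.zero_mod, Nat.cast_zero]
    rw [miniG_nopipe_append p t hp]
    ring
  | one =>
    cases p with
    | nil => exact absurd rfl hne
    | cons c r =>
      simp only [List.replicate_one, List.cons_append, List.nil_append]
      rw [miniG]
      rw [miniG_nopipe_append r t (fun h => hp (by simp [h]))]
      simp only [List.length_cons]; push_cast; ring
  | more k ih _ =>
    have hrep : List.replicate (k + 1 + 1) '|' ++ p ++ t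
        = '|' :: '|' :: (List.replicate k '|' ++ p ++ t) := by
      simp [List.replicate_succ]
    have hmod : (k + 1 + 1) % 2 = k % 2 := by omega
    rw [hrep, miniG, ih t, hmod]

-- loop invariant for B's fold: pending run of pipes plus the '|'-prefixed remaining parts
theorem foldB_eq (ps : List (List Char)) (res : Int) (run : Nat)
    (h : ∀ p ∈ ps, '|' ∉ p) :
    (ps.foldl miniMcilenStepB (res, run)).1
      = res + miniG (List.replicate run '|' ++ ps.flatMap (fun q => '|' :: q)) := by
  induction ps generalizing res run with
  | nil => simp [miniG_replicate]
  | cons p ps ih =>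
    simp only [List.foldl_cons, List.flatMap_cons]
    by_cases hp : p = []
    · subst hp
      simp only [miniMcilenStepB, List.isEmpty_nil, if_pos]
      rw [ih res (run + 1) (fun q hq => h q (by simp [hq]))]
      congr 2
      rw [List.replicate_succ']
      simp
    · simp only [miniMcilenStepB, List.isEmpty_eq_false_iff.mpr hp]
      simp only [Bool.false_eq_true, if_false]
      rw [ih _ 0 (fun q hq => h q (by simp [hq]))]
      simp only [List.cons_append]
      rw [show List.replicate run '|'
            ++ ('|' :: (p ++ List.flatMap (fun q => '|' :: q) ps))
          = List.replicate (run + 1) '|' ++ p ++ List.flatMap (fun q => '|' :: q) ps from by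
        rw [List.replicate_succ']; simp]
      rw [miniG_pipes (run + 1) p _ (h p (by simp)) hp]
      simp
      ring

-- ===== VERDICT (by name: the statement is the Claim_ definition above) =====
theorem mini_mcilen_spec : Claim_equal_mini_mcilen := by
  intro txt _
  unfold Spec_mini_mcilen
  obtain ⟨p, ps, hsp, hjoin, hnp⟩ := splitPipe_spec txt.toList
  have hB : mini_mcilen_alt txt = (ps.foldl miniMcilenStepB ((p.length : Int), 0)).1 := by
    unfold mini_mcilen_alt
    rw [splitOn_eq_splitPipe, hsp]
  rw [hB, foldB_eq ps _ 0 (fun q hq => hnp q (by simp [hq]))]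
  unfold mini_mcilen
  rw [miniMcilenLoopA_eq]
  simp only [List.replicate_zero, List.nil_append, List.drop_zero]
  rw [hjoin, miniG_nopipe_append p _ (hnp p (by simp))]
  ring
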